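-- pv_equiv track=rewrite | github.com/ChanMeng666/juejin-algorithm-practice | problems/077-quality-chapter-selection/solution.py | solution
-- ===== SOURCE A (Python) =====
-- def solution(n, k, array_a):
--     def count_quality_chapters(left, right):
--         # Count the number of quality chapters in the given interval
--         if right - left < 2:  # No quality chapters when interval length is less than 3
--             return 0
--         count = 0
--         for i in range(left + 1, right):
--             if array_a[i] > array_a[i-1] and array_a[i] > array_a[i+1]:
--                 count += 1
--         return count
--
--     best_quality = 0  # Best quality chapter count
--     best_left = 0     # Best left boundary
--     best_right = 0    # Best right boundary
--     min_sum = float('inf')  # Minimum total word count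
--
--     # Iterate over all possible intervals
--     for left in range(n):
--         window_sum = 0
--         for right in range(left, n):
--             window_sum += array_a[right]
--             if window_sum > k:  # If total word count exceeds the limit, break inner loop
--                 break
--
--             quality_count = count_quality_chapters(left, right)
--
--             # Update the optimal solution
--             if quality_count > best_quality:
--                 best_quality = quality_count
--                 best_left = left
--                 best_right = right
--                 min_sum = window_sum
--             elif quality_count == best_quality:
--                 if window_sum < min_sum:
--                     best_left = left
--                     best_right = right
--                     min_sum = window_sum
--                 elif window_sum == min_sum and left < best_left:
--                     best_left = left
--                     best_right = right
--
--     # Return the result string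
--     return f"{best_quality},{best_left + 1},{best_right + 1}"
-- ===== SOURCE B (Python) =====
-- def solution(n, k, array_a):
--     m = n if n > 0 else 0
--
--     def _prefix(xs):
--         out = [0]
--         for x in xs:
--             out.append(out[-1] + x)
--         return out
--
--     # peak indicator per index, then prefix sums: interval peak counts in O(1)
--     peaks = [1 if 0 < i < m - 1 and array_a[i-1] < array_a[i] > array_a[i+1] else 0
--              for i in range(m)]
--     Q = _prefix(peaks)
--     S = _prefix(array_a[:m])
--
--     best_quality, best_left, best_right = 0, 0, 0
--     min_sum = None  # None = +infinity
--     for left in range(m):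
--         for right in range(left, m):
--             window_sum = S[right + 1] - S[left]
--             if window_sum > k:
--                 break
--             quality = Q[right] - Q[left + 1] if right - left >= 2 else 0
--             if quality > best_quality or (quality == best_quality and
--                                           (min_sum is None or window_sum < min_sum)):
--                 best_quality, best_left, best_right, min_sum = quality, left, right, window_sum
--     return f"{best_quality},{best_left + 1},{best_right + 1}"
-- ===== Notes on version B (the rewrite author's own statement) =====
-- stated objective: faster
-- what changed: B precomputes prefix sums of a peak-indicator array and of the values, so each interval's peak count and word sum are O(1) lookups instead of A's O(n) rescan per interval.
import Mathlib
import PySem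

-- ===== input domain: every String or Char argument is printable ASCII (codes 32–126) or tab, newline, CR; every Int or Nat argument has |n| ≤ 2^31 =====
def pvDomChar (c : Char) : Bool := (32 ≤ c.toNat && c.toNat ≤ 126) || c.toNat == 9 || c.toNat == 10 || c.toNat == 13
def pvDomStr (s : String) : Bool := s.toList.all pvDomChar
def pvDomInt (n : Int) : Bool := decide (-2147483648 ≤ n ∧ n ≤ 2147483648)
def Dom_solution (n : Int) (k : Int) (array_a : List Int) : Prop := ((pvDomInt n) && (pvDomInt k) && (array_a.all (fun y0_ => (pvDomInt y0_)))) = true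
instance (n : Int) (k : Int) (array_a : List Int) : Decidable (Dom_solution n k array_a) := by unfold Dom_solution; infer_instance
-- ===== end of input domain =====

-- B replaces A's per-interval O(n) peak-counting scan by prefix sums of a peak-indicator
-- array (O(1) per interval) and prefix sums of the values; objective: faster (O(n^3) → O(n^2)).

-- ===== PORT A =====
-- min_sum = float('inf') is modelled as Option Int: none = +infinity (never returned).
def pvLtInf (ws : Int) (ms : Option Int) : Bool :=
  match ms with
  | none => true
  | some mv => decide (ws < mv)

def pvEqInf (ws : Int) (ms : Option Int) : Bool :=
  match ms with
  | none => false
  | some mv => decide (ws = mv)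

def pvCountA (a : List Int) (left right : Int) : Int :=
  if right - left < 2 then 0
  else
    (PySem.List.pyRange (left + 1) right 1).foldl
      (fun count i =>
        if PySem.List.pyGetD a i 0 > PySem.List.pyGetD a (i - 1) 0 ∧
           PySem.List.pyGetD a i 0 > PySem.List.pyGetD a (i + 1) 0 then count + 1 else count) 0

def pvUpdateA (st : Int × Int × Int × Option Int) (left right q ws : Int) :
    Int × Int × Int × Option Int :=
  match st with
  | (bq, bl, br, ms) =>
    if q > bq then (q, left, right, some ws)
    else if q = bq then
      if pvLtInf ws ms then (bq, left, right, some ws)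
      else if pvEqInf ws ms && decide (left < bl) then (bq, left, right, ms)
      else (bq, bl, br, ms)
    else (bq, bl, br, ms)

def pvInnerA (a : List Int) (k left : Int) :
    List Int → (Int × Int × Int × Option Int) → Int → (Int × Int × Int × Option Int)
  | [], st, _ => st
  | r :: rs, st, ws =>
    let ws' := ws + PySem.List.pyGetD a r 0
    if ws' > k then st
    else pvInnerA a k left rs (pvUpdateA st left r (pvCountA a left r) ws') ws'

def solution (n : Int) (k : Int) (array_a : List Int) : String :=
  let st := (PySem.List.pyRange 0 n 1).foldl
    (fun st left => pvInnerA array_a k left (PySem.List.pyRange left n 1) st 0)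
    (0, 0, 0, none)
  PySem.Int.toStr st.1 ++ "," ++ PySem.Int.toStr (st.2.1 + 1) ++ "," ++ PySem.Int.toStr (st.2.2.1 + 1)

-- ===== PORT B =====
def pvPrefix (xs : List Int) : List Int :=
  xs.foldl (fun out x => out ++ [PySem.List.pyGetD out (-1) 0 + x]) [0]

def pvPeaks (a : List Int) (m : Int) : List Int :=
  (PySem.List.pyRange 0 m 1).map (fun i =>
    if 0 < i ∧ i < m - 1 ∧ PySem.List.pyGetD a (i - 1) 0 < PySem.List.pyGetD a i 0 ∧
       PySem.List.pyGetD a (i + 1) 0 < PySem.List.pyGetD a i 0 then 1 else 0)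

def pvUpdateB (st : Int × Int × Int × Option Int) (left right q ws : Int) :
    Int × Int × Int × Option Int :=
  match st with
  | (bq, bl, br, ms) =>
    if q > bq ∨ (q = bq ∧ (ms = none ∨ ws < ms.getD 0)) then (q, left, right, some ws)
    else (bq, bl, br, ms)

def pvInnerB (k left : Int) (Q S : List Int) :
    List Int → (Int × Int × Int × Option Int) → (Int × Int × Int × Option Int)
  | [], st => st
  | r :: rs, st =>
    let ws := PySem.List.pyGetD S (r + 1) 0 - PySem.List.pyGetD S left 0
    if ws > k then st
    else pvInnerB k left Q S rs
      (pvUpdateB st left r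
        (if r - left ≥ 2 then PySem.List.pyGetD Q r 0 - PySem.List.pyGetD Q (left + 1) 0 else 0) ws)

def solution_alt (n : Int) (k : Int) (array_a : List Int) : String :=
  let m := if n > 0 then n else 0
  let Q := pvPrefix (pvPeaks array_a m)
  let S := pvPrefix (PySem.List.slice array_a none (some m))
  let st := (PySem.List.pyRange 0 m 1).foldl
    (fun st left => pvInnerB k left Q S (PySem.List.pyRange left m 1) st)
    (0, 0, 0, none)
  PySem.Int.toStr st.1 ++ "," ++ PySem.Int.toStr (st.2.1 + 1) ++ "," ++ PySem.Int.toStr (st.2.2.1 + 1)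

-- ===== PRECONDITION & SPEC =====
-- A raises IndexError exactly when n exceeds len(array_a); Pre_ excludes exactly those inputs.
def Pre_solution (n : Int) (k : Int) (array_a : List Int) : Prop := n ≤ (array_a.length : Int)
instance (n : Int) (k : Int) (array_a : List Int) : Decidable (Pre_solution n k array_a) := by
  unfold Pre_solution; infer_instance

def pvWitness_solution : Int × Int × List Int := (5, 10, [1, 5, 2, 6, 1])

def Spec_solution (n : Int) (k : Int) (array_a : List Int) (out : String) : Prop :=
  out = solution_alt n k array_a
instance (n : Int) (k : Int) (array_a : List Int) (out : String) :
    Decidable (Spec_solution n k array_a out) := by unfold Spec_solution; infer_instance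

-- ===== CLAIM (what is proved, stated in full; the proofs are below) =====
def Claim_equal_solution : Prop := ∀ (n : Int) (k : Int) (array_a : List Int),
  Dom_solution n k array_a → Pre_solution n k array_a →
  Spec_solution n k array_a (solution n k array_a)

-- ===== LEMMAS AND PROOFS =====

-- the prefix-list fold of B, started from an arbitrary seed
def pvPfold (s : Int) (xs : List Int) : List Int :=
  xs.foldl (fun out x => out ++ [PySem.List.pyGetD out (-1) 0 + x]) [s]

-- the peak indicator B maps over range(m)
def pvPk (a : List Int) (m : Int) (i : Int) : Int :=
  if 0 < i ∧ i < m - 1 ∧ PySem.List.pyGetD a (i - 1) 0 < PySem.List.pyGetD a i 0 ∧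
     PySem.List.pyGetD a (i + 1) 0 < PySem.List.pyGetD a i 0 then 1 else 0

theorem pvPeaks_eq_map (a : List Int) (m : Int) :
    pvPeaks a m = (PySem.List.pyRange 0 m 1).map (pvPk a m) := rfl

theorem pvPrefix_eq_pfold (xs : List Int) : pvPrefix xs = pvPfold 0 xs := rfl

theorem pvGetD_nonneg (xs : List Int) (i : Int) (h : 0 ≤ i) :
    PySem.List.pyGetD xs i 0 = xs.getD i.toNat 0 := by
  have := PySem.List.pyGetD_natCast (xs := xs) (n := i.toNat) (d := (0:Int))
  rwa [Int.toNat_of_nonneg h] at this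

theorem pvPfold_shift (xs : List Int) : ∀ (pre : List Int) (s : Int),
    xs.foldl (fun out x => out ++ [PySem.List.pyGetD out (-1) 0 + x]) (pre ++ [s])
      = pre ++ pvPfold s xs := by
  induction xs with
  | nil => intro pre s; simp [pvPfold]
  | cons x xs ih =>
    intro pre s
    have hlast : PySem.List.pyGetD (pre ++ [s]) (-1) 0 = s :=
      PySem.List.pyGetD_neg_one_append_singleton ..
    have hlast1 : PySem.List.pyGetD ([s] : List Int) (-1) 0 = s := by
      have := PySem.List.pyGetD_neg_one_append_singleton (xs := ([] : List Int)) (x := s) (d := (0:Int))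
      simpa using this
    simp only [List.foldl_cons, pvPfold, hlast, hlast1]
    rw [show pre ++ [s] ++ [s + x] = (pre ++ [s]) ++ [s + x] from by simp, ih (pre ++ [s]) (s + x)]
    rw [ih [s] (s + x)]
    simp [pvPfold]

theorem pvPfold_cons (s x : Int) (xs : List Int) :
    pvPfold s (x :: xs) = s :: pvPfold (s + x) xs := by
  have hlast1 : PySem.List.pyGetD ([s] : List Int) (-1) 0 = s := by
    have := PySem.List.pyGetD_neg_one_append_singleton (xs := ([] : List Int)) (x := s) (d := (0:Int))
    simpa using this
  simp only [pvPfold, List.foldl_cons, hlast1]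
  have := pvPfold_shift xs [s] (s + x)
  simpa [pvPfold] using this

theorem pvPfold_getD (xs : List Int) : ∀ (s : Int) (j : Nat), j ≤ xs.length →
    (pvPfold s xs).getD j 0 = s + (xs.take j).sum := by
  induction xs with
  | nil =>
    intro s j hj
    have hj0 : j = 0 := by simpa using hj
    subst hj0; simp [pvPfold]
  | cons x xs ih =>
    intro s j hj
    rw [pvPfold_cons]
    cases j with
    | zero => simp
    | succ j =>
      simp only [List.getD_cons_succ, List.take_succ_cons, List.sum_cons]
      rw [ih (s + x) j (by simp only [List.length_cons] at hj; omega)]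
      ring

theorem pvS_getD (a : List Int) (m j : Int) (h0 : 0 ≤ j) (hjm : j ≤ m)
    (hm : m ≤ (a.length : Int)) :
    PySem.List.pyGetD (pvPrefix (PySem.List.slice a none (some m))) j 0
      = (a.take j.toNat).sum := by
  have hm0 : 0 ≤ m := le_trans h0 hjm
  rw [show m = ((m.toNat : Nat) : Int) from (Int.toNat_of_nonneg hm0).symm,
    PySem.List.slice_to_natCast]
  rw [pvGetD_nonneg _ _ h0, pvPrefix_eq_pfold,
    pvPfold_getD _ 0 j.toNat (by simp [List.length_take]; omega)]
  rw [List.take_take]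
  have : min j.toNat m.toNat = j.toNat := by omega
  rw [this]; ring

theorem pvQ_getD (a : List Int) (m j : Int) (h0 : 0 ≤ j) (hjm : j ≤ m) :
    PySem.List.pyGetD (pvPrefix (pvPeaks a m)) j 0
      = ((PySem.List.pyRange 0 j 1).map (pvPk a m)).sum := by
  rw [pvGetD_nonneg _ _ h0, pvPrefix_eq_pfold, pvPeaks_eq_map,
    pvPfold_getD _ 0 j.toNat (by simp [PySem.List.length_pyRange_one]; omega)]
  rw [PySem.List.pyRange_one_append 0 j m h0 hjm, List.map_append]
  rw [List.take_left' (by simp [PySem.List.length_pyRange_one])]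
  ring

theorem pvCount_eq (a : List Int) (m left r : Int) (h0 : 0 ≤ left) (hlr : left ≤ r)
    (hr : r < m) :
    pvCountA a left r =
      (if r - left ≥ 2 then
          PySem.List.pyGetD (pvPrefix (pvPeaks a m)) r 0
            - PySem.List.pyGetD (pvPrefix (pvPeaks a m)) (left + 1) 0
        else 0) := by
  by_cases h2 : r - left ≥ 2
  · have hcongr : ∀ i ∈ PySem.List.pyRange (left + 1) r 1,
        pvPk a m i = if PySem.List.pyGetD a (i - 1) 0 < PySem.List.pyGetD a i 0 ∧
            PySem.List.pyGetD a (i + 1) 0 < PySem.List.pyGetD a i 0 then 1 else 0 := by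
      intro i hi
      rw [PySem.List.mem_pyRange_one] at hi
      unfold pvPk
      have g1 : 0 < i := by omega
      have g2 : i < m - 1 := by omega
      simp [g1, g2]
    rw [if_pos h2, pvQ_getD a m r (by omega) (by omega),
      pvQ_getD a m (left + 1) (by omega) (by omega),
      PySem.List.pyRange_one_append 0 (left + 1) r (by omega) (by omega),
      List.map_append, List.sum_append, add_sub_cancel_left,
      List.map_congr_left hcongr]
    unfold pvCountA
    rw [if_neg (by omega), PySem.List.foldl_ite_add_one,
      ← PySem.List.sum_map_ite_one_zero
        (p := fun i => decide (PySem.List.pyGetD a (i - 1) 0 < PySem.List.pyGetD a i 0 ∧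
          PySem.List.pyGetD a (i + 1) 0 < PySem.List.pyGetD a i 0))]
    simp
  · rw [if_neg h2]; unfold pvCountA; rw [if_pos (by omega)]

theorem pvLtInf_iff (ws : Int) (ms : Option Int) :
    pvLtInf ws ms = true ↔ (ms = none ∨ ws < ms.getD 0) := by
  cases ms <;> simp [pvLtInf]

theorem pvUpdate_eq (st : Int × Int × Int × Option Int) (left right q ws : Int)
    (h : st.2.1 ≤ left) :
    pvUpdateA st left right q ws = pvUpdateB st left right q ws := by
  obtain ⟨bq, bl, br, ms⟩ := st
  simp only at h
  simp only [pvUpdateA, pvUpdateB]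
  by_cases h1 : q > bq
  · simp [h1]
  · by_cases hq : q = bq
    · subst hq
      by_cases h3 : pvLtInf ws ms = true
      · simp [h3, (pvLtInf_iff ws ms).mp h3]
      · have h3' : ¬(ms = none ∨ ws < ms.getD 0) := fun hc => h3 ((pvLtInf_iff ws ms).mpr hc)
        have h4 : (pvEqInf ws ms && decide (left < bl)) = false := by
          simp only [Bool.and_eq_false_iff]
          right; simpa using by omega
        simp [h3, h3', h4]
    · simp [h1, hq]

theorem pvUpdateB_bl (st : Int × Int × Int × Option Int) (left right q ws : Int)
    (h : st.2.1 ≤ left) : (pvUpdateB st left right q ws).2.1 ≤ left := by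
  obtain ⟨bq, bl, br, ms⟩ := st
  simp only at h
  simp only [pvUpdateB]
  split_ifs <;> simp [h]

theorem pvTakeSucc (a : List Int) (r : Int) (h0 : 0 ≤ r) (hr : r < (a.length : Int)) :
    (a.take (r + 1).toNat).sum = (a.take r.toNat).sum + PySem.List.pyGetD a r 0 := by
  have hlt : r.toNat < a.length := by omega
  rw [pvGetD_nonneg _ _ h0, show (r + 1).toNat = r.toNat + 1 by omega,
    List.sum_take_succ _ _ hlt]
  simp [List.getD, List.getElem?_eq_getElem hlt]

theorem pvInner_eq (a : List Int) (k n left : Int) (hn : n ≤ (a.length : Int))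
    (h0 : 0 ≤ left) :
    ∀ (d : Nat) (r0 : Int) (st : Int × Int × Int × Option Int) (ws : Int),
      left ≤ r0 → d = (n - r0).toNat → st.2.1 ≤ left →
      ws = (a.take r0.toNat).sum - (a.take left.toNat).sum →
      pvInnerA a k left (PySem.List.pyRange r0 n 1) st ws
          = pvInnerB k left (pvPrefix (pvPeaks a n))
              (pvPrefix (PySem.List.slice a none (some n)))
              (PySem.List.pyRange r0 n 1) st
        ∧ (pvInnerA a k left (PySem.List.pyRange r0 n 1) st ws).2.1 ≤ left := by
  intro d
  induction d with
  | zero =>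
    intro r0 st ws hlr hd hbl hws
    rw [PySem.List.pyRange_one_eq_nil (by omega)]
    exact ⟨rfl, hbl⟩
  | succ d ih =>
    intro r0 st ws hlr hd hbl hws
    by_cases hr : r0 < n
    · rw [PySem.List.pyRange_one_cons hr]
      simp only [pvInnerA, pvInnerB]
      have hws' : ws + PySem.List.pyGetD a r0 0
          = PySem.List.pyGetD (pvPrefix (PySem.List.slice a none (some n))) (r0 + 1) 0
            - PySem.List.pyGetD (pvPrefix (PySem.List.slice a none (some n))) left 0 := by
        rw [pvS_getD a n (r0 + 1) (by omega) (by omega) hn,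
          pvS_getD a n left (by omega) (by omega) hn,
          pvTakeSucc a r0 (by omega) (by omega), hws]
        ring
      rw [← hws']
      by_cases hk : ws + PySem.List.pyGetD a r0 0 > k
      · rw [if_pos hk, if_pos hk]
        exact ⟨rfl, hbl⟩
      · rw [if_neg hk, if_neg hk]
        rw [pvCount_eq a n left r0 h0 hlr hr]
        rw [pvUpdate_eq st left r0 _ _ hbl]
        exact ih (r0 + 1)
          (pvUpdateB st left r0 _ _) _
          (by omega) (by omega)
          (pvUpdateB_bl st left r0 _ _ hbl)
          (by rw [pvTakeSucc a r0 (by omega) (by omega), hws]; ring)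
    · rw [PySem.List.pyRange_one_eq_nil (by omega)]
      exact ⟨rfl, hbl⟩

theorem pvOuter_eq (a : List Int) (k n : Int) (hn : n ≤ (a.length : Int)) :
    ∀ (d : Nat) (left : Int) (st : Int × Int × Int × Option Int),
      0 ≤ left → d = (n - left).toNat → st.2.1 ≤ left →
      (PySem.List.pyRange left n 1).foldl
          (fun st l => pvInnerA a k l (PySem.List.pyRange l n 1) st 0) st
        = (PySem.List.pyRange left n 1).foldl
            (fun st l => pvInnerB k l (pvPrefix (pvPeaks a n))
              (pvPrefix (PySem.List.slice a none (some n)))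
              (PySem.List.pyRange l n 1) st) st := by
  intro d
  induction d with
  | zero =>
    intro left st h0 hd hbl
    rw [PySem.List.pyRange_one_eq_nil (by omega)]
    rfl
  | succ d ih =>
    intro left st h0 hd hbl
    by_cases hl : left < n
    · rw [PySem.List.pyRange_one_cons hl]
      simp only [List.foldl_cons]
      obtain ⟨heq, hbl'⟩ := pvInner_eq a k n left hn h0 (n - left).toNat left st 0
        le_rfl rfl hbl (by ring)
      rw [← heq]
      exact ih (left + 1) _ (by omega) (by omega) (le_trans hbl' (by omega))
    · rw [PySem.List.pyRange_one_eq_nil (by omega)]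
      rfl

-- ===== VERDICT (by name: the statement is the Claim_ definition above) =====
theorem solution_spec : Claim_equal_solution := by
  intro n k a _hdom hpre
  unfold Spec_solution Pre_solution at *
  by_cases hn0 : n > 0
  · simp only [solution, solution_alt, if_pos hn0]
    rw [pvOuter_eq a k n hpre n.toNat 0 (0, 0, 0, none) le_rfl (by omega) (by simp)]
  · simp only [solution, solution_alt, if_neg hn0]
    rw [PySem.List.pyRange_one_eq_nil (by omega : n ≤ 0),
      PySem.List.pyRange_one_eq_nil (le_refl (0:Int))]
    rfl
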